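-- pv_equiv track=rewrite | github.com/besednjaksimon/programiranje-1 | tretja_naloga.py | zabica
-- ===== SOURCE A (Python) =====
-- from functools import lru_cache
--
-- def zabica(mocvara):
--     dolzina = len(mocvara)
--
--     @lru_cache(maxsize=None)
--     def skok(polozaj, energija):
--         if polozaj >= dolzina:
--             return 0
--         moznosti = []
--         for j in range(1, energija+1):
--             if polozaj+j >= dolzina:
--                 return 1
--             else:
--                 moznost = skok(polozaj+j, energija-j+mocvara[polozaj+j]) + 1
--                 moznosti.append(moznost)
--         if moznosti:
--             return min(moznosti)
--         else:
--             return 0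
--     return skok(0, mocvara[0])
-- ===== SOURCE B (Python) =====
-- def zabica(mocvara):
--     n = len(mocvara)
--     # forward sweep: reach[p] = set of energies the frog can arrive at position p with
--     reach = [set() for _ in range(n)]
--     reach[0].add(mocvara[0])
--     for p in range(n):
--         for e in reach[p]:
--             if 1 <= e < n - p:
--                 for j in range(1, e + 1):
--                     reach[p + j].add(e - j + mocvara[p + j])
--     # backward sweep: tabulate the jump count for every reachable state
--     val = {}
--     for p in reversed(range(n)):
--         for e in reach[p]:
--             if e >= n - p:
--                 val[(p, e)] = 1
--             elif e <= 0:
--                 val[(p, e)] = 0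
--             else:
--                 val[(p, e)] = 1 + min(val[(p + j, e - j + mocvara[p + j])]
--                                       for j in range(1, e + 1))
--     return val[(0, mocvara[0])]
-- ===== Notes on version B (the rewrite author's own statement) =====
-- stated objective: alternative
-- what changed: Replaces the lazy memoized top-down recursion with an explicit two-pass iterative DP: a forward sweep enumerates the reachable (position, energy) states into per-position sets, then a backward sweep over positions tabulates the jump count of each reachable state in a dict, so there is no recursion at all.
import Mathlib
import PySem

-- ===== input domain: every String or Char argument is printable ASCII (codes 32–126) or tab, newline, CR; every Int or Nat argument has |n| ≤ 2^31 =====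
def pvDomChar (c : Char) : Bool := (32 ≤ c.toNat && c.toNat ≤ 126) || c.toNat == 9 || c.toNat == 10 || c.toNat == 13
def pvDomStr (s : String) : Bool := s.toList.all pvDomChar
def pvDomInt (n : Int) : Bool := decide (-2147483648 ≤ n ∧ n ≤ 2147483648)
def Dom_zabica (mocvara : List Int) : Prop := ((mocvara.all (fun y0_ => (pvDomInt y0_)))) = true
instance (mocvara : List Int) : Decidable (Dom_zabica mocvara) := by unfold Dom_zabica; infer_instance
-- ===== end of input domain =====

-- B replaces A's lazy memoized recursion by an iterative two-pass DP (forward reachable-state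
-- enumeration, then backward tabulation); same return value on every non-empty list.

-- ===== PORT A =====
-- A's inner 'skok' (the lru_cache only affects speed, not the value) with its j-loop
-- transliterated as 'zabicaGo' over the loop counter k (j = k+1) and the accumulator 'moznosti'.
mutual
def zabicaGo (m : List Int) (n p e : Int) (k : Nat) (acc : List Int) : Int :=
  if _h1 : e ≤ (k : Int) then
    (match acc with | [] => 0 | h :: t => t.foldl min h)
  else if _h2 : n ≤ p + ((k : Int) + 1) then 1
  else
    zabicaGo m n p e (k + 1)
      (acc ++ [zabicaSkok m n (p + ((k : Int) + 1))
                 (e - ((k : Int) + 1) + PySem.List.pyGetD m (p + ((k : Int) + 1)) 0) + 1])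
termination_by ((n - p).toNat, (e - (k : Int)).toNat)
decreasing_by
  · exact Prod.Lex.left _ _ (by omega)
  · exact Prod.Lex.right _ (by omega)

def zabicaSkok (m : List Int) (n p e : Int) : Int :=
  if n ≤ p then 0
  else zabicaGo m n p e 0 []
termination_by ((n - p).toNat, e.toNat + 1)
decreasing_by
  exact Prod.Lex.right _ (by omega)
end

def zabica (mocvara : List Int) : Int :=
  zabicaSkok mocvara (mocvara.length : Int) 0 (PySem.List.pyGetD mocvara 0 0)

-- ===== PORT B =====
-- 'reach[p+j].add(...)': the list index is provably in range on every reached call, so the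
-- total forms pyGetD/pySetD are exact here.
def altUpd (r : List (List Int)) (i : Int) (x : Int) : List (List Int) :=
  PySem.List.pySetD r i (PySem.Set.add (PySem.List.pyGetD r i []) x)

-- innermost loop: for j in range(1, e+1): reach[p+j].add(e-j+mocvara[p+j])
def altInner (m : List Int) (p e : Int) (r : List (List Int)) : List (List Int) :=
  (PySem.List.pyRange 1 (e + 1) 1).foldl
    (fun r' j => altUpd r' (p + j) (e - j + PySem.List.pyGetD m (p + j) 0)) r

-- forward sweep over p in range(n); the snapshot reach[p] is never mutated while iterated
def altForward (m : List Int) (n : Int) (r0 : List (List Int)) : List (List Int) :=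
  (PySem.List.pyRange 0 n 1).foldl
    (fun r p =>
      (PySem.List.pyGetD r p []).foldl
        (fun r' e => if 1 ≤ e ∧ e < n - p then altInner m p e r' else r') r) r0

-- min(nonempty list); the [] branch is unreachable on every call made (e ≥ 1 there)
def altMin : List Int → Int
  | [] => 0
  | h :: t => t.foldl min h

-- backward sweep over reversed(range(n)); dict lookups provably hit, so getD is exact
def altBackward (m : List Int) (n : Int) (reach : List (List Int)) :
    PySem.Dict (Int × Int) Int :=
  ((PySem.List.pyRange 0 n 1).reverse).foldl
    (fun val p =>
      (PySem.List.pyGetD reach p []).foldl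
        (fun val' e =>
          if n - p ≤ e then val'.insert (p, e) 1
          else if e ≤ 0 then val'.insert (p, e) 0
          else val'.insert (p, e)
            (1 + altMin ((PySem.List.pyRange 1 (e + 1) 1).map
                (fun j => val'.getD (p + j, e - j + PySem.List.pyGetD m (p + j) 0) 0))))
        val)
    PySem.Dict.empty

def zabica_alt (mocvara : List Int) : Int :=
  let n : Int := mocvara.length
  let r1 := altUpd (List.replicate mocvara.length ([] : List Int)) 0
              (PySem.List.pyGetD mocvara 0 0)
  let reach := altForward mocvara n r1
  (altBackward mocvara n reach).getD (0, PySem.List.pyGetD mocvara 0 0) 0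

-- ===== PRECONDITION & SPEC =====
-- A indexes the first swamp cell on entry: the empty list (IndexError in both programs) is excluded.
def Pre_zabica (mocvara : List Int) : Prop := mocvara ≠ []
instance (mocvara : List Int) : Decidable (Pre_zabica mocvara) := by
  unfold Pre_zabica; infer_instance

def pvWitness_zabica : List Int := [2, 0, 1]

def Spec_zabica (mocvara : List Int) (out : Int) : Prop := out = zabica_alt mocvara
instance (mocvara : List Int) (out : Int) : Decidable (Spec_zabica mocvara out) := by
  unfold Spec_zabica; infer_instance

-- ===== CLAIM (what is proved, stated in full; the proofs are below) =====
def Claim_equal_zabica : Prop :=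
  ∀ (mocvara : List Int), Dom_zabica mocvara → Pre_zabica mocvara →
    Spec_zabica mocvara (zabica mocvara)

-- ===== LEMMAS AND PROOFS =====
-- ---- proof-only bridge: the value function both programs compute ----
def look (r : List (List Int)) (q : Int) : List Int := PySem.List.pyGetD r q []

def fs (m : List Int) (n p e : Int) : Int :=
  if _h1 : n - p ≤ e then 1
  else if _h2 : e ≤ 0 then 0
  else 1 + altMin ((PySem.List.pyRange 1 (e + 1) 1).attach.map
      (fun j => fs m n (p + j.1) (e - j.1 + PySem.List.pyGetD m (p + j.1) 0)))
termination_by (n - p).toNat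
decreasing_by
  have hj := PySem.List.mem_pyRange_one.1 j.2
  omega

lemma fs_eq (m : List Int) (n p e : Int) :
    fs m n p e = if n - p ≤ e then 1 else if e ≤ 0 then 0
      else 1 + altMin ((PySem.List.pyRange 1 (e + 1) 1).map
          (fun j => fs m n (p + j) (e - j + PySem.List.pyGetD m (p + j) 0))) := by
  rw [fs, List.attach_map_val
    (f := fun j => fs m n (p + j) (e - j + PySem.List.pyGetD m (p + j) 0))]
  simp only [dite_eq_ite]

-- ---- A-side: the j-loop of skok computes min over the option list ----
lemma foldl_min_add_one (t : List Int) (a : Int) :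
    (t.map (fun x => x + 1)).foldl min (a + 1) = t.foldl min a + 1 := by
  induction t generalizing a with
  | nil => simp
  | cons x t ih => simp only [List.map_cons, List.foldl_cons, min_add_add_right, ih]

lemma altMin_map_add_one (L : List Int) (g : Int → Int) (hL : L ≠ []) :
    altMin (L.map (fun x => g x + 1)) = altMin (L.map g) + 1 := by
  cases L with
  | nil => exact absurd rfl hL
  | cons x t =>
    simp only [List.map_cons, altMin]
    have h : t.map (fun x => g x + 1) = (t.map g).map (fun x => x + 1) := by simp
    rw [h, foldl_min_add_one]

lemma go_early (m : List Int) (n p e : Int) :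
    ∀ (d k : Nat) (acc : List Int), (e - (k : Int)).toNat ≤ d → (k : Int) < n - p →
      n - p ≤ e → zabicaGo m n p e k acc = 1 := by
  intro d
  induction d with
  | zero => intro k acc h hk he; omega
  | succ d ih =>
    intro k acc h hk he
    rw [zabicaGo.eq_def, dif_neg (by omega : ¬ e ≤ (k : Int))]
    by_cases h2 : n ≤ p + ((k : Int) + 1)
    · rw [dif_pos h2]
    · rw [dif_neg h2]
      exact ih (k + 1) _ (by push_cast; omega) (by push_cast; omega) he

lemma go_main (m : List Int) (n p e : Int) (hlt : e < n - p) :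
    ∀ (d k : Nat) (acc : List Int), (e - (k : Int)).toNat ≤ d →
      zabicaGo m n p e k acc =
        altMin (acc ++ (PySem.List.pyRange ((k : Int) + 1) (e + 1) 1).map
          (fun j => zabicaSkok m n (p + j) (e - j + PySem.List.pyGetD m (p + j) 0) + 1)) := by
  intro d
  induction d with
  | zero =>
    intro k acc h
    rw [zabicaGo.eq_def, dif_pos (by omega : e ≤ (k : Int)),
      PySem.List.pyRange_one_eq_nil (by omega)]
    cases acc <;> simp [altMin]
  | succ d ih =>
    intro k acc h
    by_cases hek : e ≤ (k : Int)
    · rw [zabicaGo.eq_def, dif_pos hek, PySem.List.pyRange_one_eq_nil (by omega)]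
      cases acc <;> simp [altMin]
    · rw [zabicaGo.eq_def, dif_neg hek, dif_neg (by omega : ¬ n ≤ p + ((k : Int) + 1))]
      rw [ih (k + 1) _ (by push_cast; omega)]
      rw [PySem.List.pyRange_one_cons (by omega : (k : Int) + 1 < e + 1)]
      push_cast
      simp [List.append_assoc]

lemma skok_eq_fs (m : List Int) (n : Int) :
    ∀ (d : Nat) (p e : Int), (n - p).toNat ≤ d → 0 ≤ p → p < n →
      zabicaSkok m n p e = fs m n p e := by
  intro d
  induction d with
  | zero => intro p e h h0 h1; omega
  | succ d ih =>
    intro p e h h0 h1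
    rw [zabicaSkok.eq_def, if_neg (by omega : ¬ n ≤ p)]
    by_cases h2 : n - p ≤ e
    · rw [go_early m n p e (e - (0:Int)).toNat 0 [] (by norm_num) (by push_cast; omega) h2,
        fs_eq, if_pos h2]
    · have hge := go_main m n p e (by omega) (e - (0:Int)).toNat 0 [] (by norm_num)
      norm_num at hge
      rw [hge]
      by_cases h3 : e ≤ 0
      · rw [PySem.List.pyRange_one_eq_nil (by omega : e + 1 ≤ 1)]
        rw [fs_eq, if_neg h2, if_pos h3]
        rfl
      · have hmap : (PySem.List.pyRange 1 (e + 1) 1).map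
            (fun j => zabicaSkok m n (p + j) (e - j + PySem.List.pyGetD m (p + j) 0) + 1)
            = (PySem.List.pyRange 1 (e + 1) 1).map
            (fun j => fs m n (p + j) (e - j + PySem.List.pyGetD m (p + j) 0) + 1) := by
          apply List.map_congr_left
          intro j hj
          have hj' := PySem.List.mem_pyRange_one.1 hj
          rw [ih (p + j) _ (by omega) (by omega) (by omega)]
        rw [hmap, altMin_map_add_one _ _
          (by rw [PySem.List.pyRange_one_cons (by omega : (1:Int) < e + 1)]; simp)]
        rw [fs_eq, if_neg h2, if_neg h3, Int.add_comm]

-- ---- B-side: basic facts about the reach-array update ----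
lemma length_altUpd (r : List (List Int)) (i x : Int) :
    (altUpd r i x).length = r.length := PySem.List.length_pySetD r i _

lemma look_altUpd (r : List (List Int)) (i x q : Int) (h0 : 0 ≤ i)
    (h1 : i < (r.length : Int)) (hq : 0 ≤ q) :
    look (altUpd r i x) q =
      if q = i then PySem.Set.add (look r i) x else look r q := by
  unfold altUpd look
  rw [PySem.List.pySetD_of_nonneg _ _ h0]
  by_cases hqr : q < (r.length : Int)
  · rw [PySem.List.pyGetD_eq_getElem _ _ hq (by simpa using hqr),
      PySem.List.pyGetD_eq_getElem _ _ h0 h1]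
    by_cases hqi : q = i
    · subst hqi
      rw [if_pos rfl, List.getElem_set_self]
    · rw [if_neg hqi, List.getElem_set_ne (by omega : i.toNat ≠ q.toNat),
        PySem.List.pyGetD_eq_getElem _ _ hq hqr]
  · have hni : q ≠ i := by omega
    rw [if_neg hni,
      PySem.List.pyGetD_of_none _ _ _ ((PySem.List.pyGet?_eq_none_iff _ _).2 (by
        simp only [PySem.Raise.InRange, List.length_set]; omega)),
      PySem.List.pyGetD_of_none _ _ _ ((PySem.List.pyGet?_eq_none_iff _ _).2 (by
        simp only [PySem.Raise.InRange]; omega))]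

-- inner j-loop: lengths, monotone membership, untouched positions ≤ p, targets present
lemma inner_aux (m : List Int) (p e : Int) (hp : 0 ≤ p) :
    ∀ (d : Nat) (a : Int) (r : List (List Int)), 1 ≤ a → (e + 1 - a).toNat ≤ d →
      p + e < (r.length : Int) →
      (((PySem.List.pyRange a (e + 1) 1).foldl
          (fun r' j => altUpd r' (p + j) (e - j + PySem.List.pyGetD m (p + j) 0)) r).length
        = r.length) ∧
      (∀ q y, 0 ≤ q → y ∈ look r q →
        y ∈ look ((PySem.List.pyRange a (e + 1) 1).foldl
          (fun r' j => altUpd r' (p + j) (e - j + PySem.List.pyGetD m (p + j) 0)) r) q) ∧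
      (∀ q, 0 ≤ q → q ≤ p →
        look ((PySem.List.pyRange a (e + 1) 1).foldl
          (fun r' j => altUpd r' (p + j) (e - j + PySem.List.pyGetD m (p + j) 0)) r) q
          = look r q) ∧
      (∀ j, a ≤ j → j ≤ e →
        (e - j + PySem.List.pyGetD m (p + j) 0) ∈
          look ((PySem.List.pyRange a (e + 1) 1).foldl
            (fun r' j => altUpd r' (p + j) (e - j + PySem.List.pyGetD m (p + j) 0)) r) (p + j)) := by
  intro d
  induction d with
  | zero =>
    intro a r ha hd hlen
    rw [PySem.List.pyRange_one_eq_nil (by omega : e + 1 ≤ a)]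
    exact ⟨rfl, fun q y _ h => h, fun q _ _ => rfl, fun j hj1 hj2 => absurd hj2 (by omega)⟩
  | succ d ih =>
    intro a r ha hd hlen
    by_cases hae : e + 1 ≤ a
    · rw [PySem.List.pyRange_one_eq_nil hae]
      exact ⟨rfl, fun q y _ h => h, fun q _ _ => rfl, fun j hj1 hj2 => absurd hj2 (by omega)⟩
    · rw [PySem.List.pyRange_one_cons (by omega : a < e + 1), List.foldl_cons]
      have hlen1 : (altUpd r (p + a) (e - a + PySem.List.pyGetD m (p + a) 0)).length
          = r.length := length_altUpd _ _ _
      obtain ⟨ih1, ih2, ih3, ih4⟩ := ih (a + 1)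
        (altUpd r (p + a) (e - a + PySem.List.pyGetD m (p + a) 0))
        (by omega) (by omega) (by rw [hlen1]; exact hlen)
      have hpa0 : (0 : Int) ≤ p + a := by omega
      have hpan : p + a < (r.length : Int) := by omega
      have hlook1 : ∀ q, 0 ≤ q →
          look (altUpd r (p + a) (e - a + PySem.List.pyGetD m (p + a) 0)) q =
            if q = p + a then
              PySem.Set.add (look r (p + a)) (e - a + PySem.List.pyGetD m (p + a) 0)
            else look r q :=
        fun q hq => look_altUpd r (p + a) _ q hpa0 hpan hq
      refine ⟨ih1.trans hlen1, ?_, ?_, ?_⟩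
      · intro q y hq hy
        apply ih2 q y hq
        rw [hlook1 q hq]
        by_cases hqi : q = p + a
        · rw [if_pos hqi]
          exact (PySem.Set.mem_add _ _ _).2 (Or.inl (hqi ▸ hy))
        · rw [if_neg hqi]; exact hy
      · intro q hq hqp
        rw [ih3 q hq hqp, hlook1 q hq, if_neg (by omega)]
      · intro j hj1 hj2
        by_cases hja : j = a
        · subst hja
          apply ih2 _ _ (by omega)
          rw [hlook1 _ (by omega), if_pos rfl]
          exact (PySem.Set.mem_add _ _ _).2 (Or.inr rfl)
        · exact ih4 j (by omega) hj2

-- middle loop over the snapshot reach[p]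
lemma estep_aux (m : List Int) (n p : Int) (hp : 0 ≤ p) :
    ∀ (S : List Int) (r : List (List Int)), (r.length : Int) = n →
      ((S.foldl (fun r' e => if 1 ≤ e ∧ e < n - p then altInner m p e r' else r') r).length
        = r.length) ∧
      (∀ q y, 0 ≤ q → y ∈ look r q →
        y ∈ look (S.foldl (fun r' e => if 1 ≤ e ∧ e < n - p then altInner m p e r' else r') r) q) ∧
      (∀ q, 0 ≤ q → q ≤ p →
        look (S.foldl (fun r' e => if 1 ≤ e ∧ e < n - p then altInner m p e r' else r') r) q
          = look r q) ∧
      (∀ e ∈ S, 1 ≤ e → e < n - p → ∀ j, 1 ≤ j → j ≤ e →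
        (e - j + PySem.List.pyGetD m (p + j) 0) ∈
          look (S.foldl (fun r' e => if 1 ≤ e ∧ e < n - p then altInner m p e r' else r') r)
            (p + j)) := by
  intro S
  induction S with
  | nil =>
    intro r hlen
    exact ⟨rfl, fun q y _ h => h, fun q _ _ => rfl, fun e he => absurd he (List.not_mem_nil)⟩
  | cons e0 S ih =>
    intro r hlen
    rw [List.foldl_cons]
    by_cases hc : 1 ≤ e0 ∧ e0 < n - p
    · rw [if_pos hc]
      obtain ⟨I1, I2, I3, I4⟩ := inner_aux m p e0 hp ((e0 + 1 - 1).toNat) 1 r le_rfl le_rfl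
        (by omega)
      have hlen0 : (altInner m p e0 r).length = r.length := by
        simpa only [altInner] using I1
      obtain ⟨J1, J2, J3, J4⟩ := ih (altInner m p e0 r) (by rw [hlen0]; exact hlen)
      refine ⟨?_, ?_, ?_, ?_⟩
      · rw [J1, hlen0]
      · intro q y hq hy
        exact J2 q y hq (by simpa only [altInner] using I2 q y hq hy)
      · intro q hq hqp
        rw [J3 q hq hqp]
        simpa only [altInner] using I3 q hq hqp
      · intro e he h1 h2 j hj1 hj2
        rcases List.mem_cons.1 he with he | he
        · subst he
          exact J2 _ _ (by omega) (by simpa only [altInner] using I4 j hj1 hj2)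
        · exact J4 e he h1 h2 j hj1 hj2
    · rw [if_neg hc]
      obtain ⟨J1, J2, J3, J4⟩ := ih r hlen
      refine ⟨J1, J2, J3, ?_⟩
      intro e he h1 h2 j hj1 hj2
      rcases List.mem_cons.1 he with he | he
      · exact absurd ⟨h1, h2⟩ (he ▸ hc)
      · exact J4 e he h1 h2 j hj1 hj2

-- forward sweep: after processing positions [a, n), every processed position is "closed"
def fwd (m : List Int) (n a : Int) (r : List (List Int)) : List (List Int) :=
  (PySem.List.pyRange a n 1).foldl
    (fun r p =>
      (PySem.List.pyGetD r p []).foldl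
        (fun r' e => if 1 ≤ e ∧ e < n - p then altInner m p e r' else r') r) r

lemma fwd_cons (m : List Int) (n a : Int) (r : List (List Int)) (han : a < n) :
    fwd m n a r = fwd m n (a + 1)
      ((look r a).foldl
        (fun r' e => if 1 ≤ e ∧ e < n - a then altInner m a e r' else r') r) := by
  rw [fwd, fwd, PySem.List.pyRange_one_cons han, List.foldl_cons]
  rfl

lemma forward_aux (m : List Int) (n : Int) :
    ∀ (d : Nat) (a : Int) (r : List (List Int)), 0 ≤ a → (n - a).toNat ≤ d →
      (r.length : Int) = n →
      ((fwd m n a r).length = r.length) ∧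
      (∀ q y, 0 ≤ q → y ∈ look r q → y ∈ look (fwd m n a r) q) ∧
      (∀ q, 0 ≤ q → q ≤ a → look (fwd m n a r) q = look r q) ∧
      (∀ p', a ≤ p' → p' < n → ∀ e ∈ look (fwd m n a r) p', 1 ≤ e → e < n - p' →
        ∀ j, 1 ≤ j → j ≤ e →
          (e - j + PySem.List.pyGetD m (p' + j) 0) ∈ look (fwd m n a r) (p' + j)) := by
  intro d
  induction d with
  | zero =>
    intro a r ha hd hlen
    rw [fwd, PySem.List.pyRange_one_eq_nil (by omega)]
    exact ⟨rfl, fun q y _ h => h, fun q _ _ => rfl, fun p' h1 h2 => absurd h2 (by omega)⟩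
  | succ d ih =>
    intro a r ha hd hlen
    by_cases han : a < n
    · rw [fwd_cons m n a r han]
      obtain ⟨E1, E2, E3, E4⟩ := estep_aux m n a ha (look r a) r hlen
      obtain ⟨F1, F2, F3, F4⟩ := ih (a + 1)
        ((look r a).foldl
          (fun r' e => if 1 ≤ e ∧ e < n - a then altInner m a e r' else r') r)
        (by omega) (by omega) (by rw [E1]; exact hlen)
      refine ⟨F1.trans E1, fun q y hq hy => F2 q y hq (E2 q y hq hy), ?_, ?_⟩
      · intro q hq hqa
        rw [F3 q hq (by omega), E3 q hq hqa]
      · intro p' hp1 hp2 e he h1 h2 j hj1 hj2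
        by_cases hpa : p' = a
        · subst hpa
          rw [F3 p' (by omega) (by omega), E3 p' (by omega) le_rfl] at he
          exact F2 _ _ (by omega) (E4 e he h1 h2 j hj1 hj2)
        · exact F4 p' (by omega) hp2 e he h1 h2 j hj1 hj2
    · rw [fwd, PySem.List.pyRange_one_eq_nil (by omega)]
      exact ⟨rfl, fun q y _ h => h, fun q _ _ => rfl, fun p' h1 h2 => absurd h2 (by omega)⟩

-- ---- backward sweep ----
-- the dict after processing positions n-1, n-2, …, t
def Dt (m : List Int) (n : Int) (reach : List (List Int)) (t : Int) :
    PySem.Dict (Int × Int) Int :=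
  ((PySem.List.pyRange t n 1).reverse).foldl
    (fun val p =>
      (PySem.List.pyGetD reach p []).foldl
        (fun val' e =>
          if n - p ≤ e then val'.insert (p, e) 1
          else if e ≤ 0 then val'.insert (p, e) 0
          else val'.insert (p, e)
            (1 + altMin ((PySem.List.pyRange 1 (e + 1) 1).map
                (fun j => val'.getD (p + j, e - j + PySem.List.pyGetD m (p + j) 0) 0))))
        val)
    PySem.Dict.empty

lemma Dt_succ (m : List Int) (n : Int) (reach : List (List Int)) (t : Int) (ht : t < n) :
    Dt m n reach t =
      (PySem.List.pyGetD reach t []).foldl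
        (fun val' e =>
          if n - t ≤ e then val'.insert (t, e) 1
          else if e ≤ 0 then val'.insert (t, e) 0
          else val'.insert (t, e)
            (1 + altMin ((PySem.List.pyRange 1 (e + 1) 1).map
                (fun j => val'.getD (t + j, e - j + PySem.List.pyGetD m (t + j) 0) 0))))
        (Dt m n reach (t + 1)) := by
  rw [Dt, Dt, PySem.List.pyRange_one_cons ht, List.reverse_cons, List.foldl_append]
  rfl

-- one backward step writes exactly fs for position t, and preserves positions above t
lemma bfold_aux (m : List Int) (n : Int) (reach : List (List Int)) (t : Int)
    (h0t : 0 ≤ t) (htn : t < n)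
    (hC : ∀ p', 0 ≤ p' → p' < n → ∀ e ∈ look reach p', 1 ≤ e → e < n - p' →
      ∀ j, 1 ≤ j → j ≤ e → (e - j + PySem.List.pyGetD m (p' + j) 0) ∈ look reach (p' + j)) :
    ∀ (S : List Int), (∀ e ∈ S, e ∈ look reach t) →
      ∀ (val : PySem.Dict (Int × Int) Int),
      (∀ p e, t < p → p < n → e ∈ look reach p → val.get? (p, e) = some (fs m n p e)) →
      (∀ p e, t < p → p < n → e ∈ look reach p →
        (S.foldl (fun val' e =>
          if n - t ≤ e then val'.insert (t, e) 1
          else if e ≤ 0 then val'.insert (t, e) 0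
          else val'.insert (t, e)
            (1 + altMin ((PySem.List.pyRange 1 (e + 1) 1).map
                (fun j => val'.getD (t + j, e - j + PySem.List.pyGetD m (t + j) 0) 0)))) val).get?
          (p, e) = some (fs m n p e)) ∧
      (∀ e, (val.get? (t, e) = some (fs m n t e) ∨ e ∈ S) →
        (S.foldl (fun val' e =>
          if n - t ≤ e then val'.insert (t, e) 1
          else if e ≤ 0 then val'.insert (t, e) 0
          else val'.insert (t, e)
            (1 + altMin ((PySem.List.pyRange 1 (e + 1) 1).map
                (fun j => val'.getD (t + j, e - j + PySem.List.pyGetD m (t + j) 0) 0)))) val).get?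
          (t, e) = some (fs m n t e)) := by
  intro S
  induction S with
  | nil =>
    intro hS val H1
    exact ⟨fun p e h1 h2 h3 => H1 p e h1 h2 h3,
      fun e h => h.elim id (fun h' => absurd h' (List.not_mem_nil))⟩
  | cons e0 S ih =>
    intro hS val H1
    rw [List.foldl_cons]
    have hval1 : (if n - t ≤ e0 then val.insert (t, e0) 1
        else if e0 ≤ 0 then val.insert (t, e0) 0
        else val.insert (t, e0)
          (1 + altMin ((PySem.List.pyRange 1 (e0 + 1) 1).map
              (fun j => val.getD (t + j, e0 - j + PySem.List.pyGetD m (t + j) 0) 0))))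
        = val.insert (t, e0) (fs m n t e0) := by
      by_cases hA : n - t ≤ e0
      · rw [if_pos hA, fs_eq, if_pos hA]
      · by_cases hB : e0 ≤ 0
        · rw [if_neg hA, if_pos hB, fs_eq, if_neg hA, if_pos hB]
        · rw [if_neg hA, if_neg hB, fs_eq, if_neg hA, if_neg hB]
          apply congrArg
          apply congrArg
          apply congrArg
          apply List.map_congr_left
          intro j hj
          have hj' := PySem.List.mem_pyRange_one.1 hj
          have hmem := hC t h0t htn e0 (hS e0 List.mem_cons_self) (by omega) (by omega)
            j (by omega) (by omega)
          rw [PySem.Dict.getD_eq_get?_getD,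
            H1 (t + j) _ (by omega) (by omega) hmem]
          rfl
    rw [hval1]
    have H1' : ∀ p e, t < p → p < n → e ∈ look reach p →
        (val.insert (t, e0) (fs m n t e0)).get? (p, e) = some (fs m n p e) := by
      intro p e h1 h2 h3
      have hne : (p, e) ≠ (t, e0) := by
        intro hpe; rw [Prod.mk.injEq] at hpe; omega
      rw [PySem.Dict.get?_insert_of_ne _ _ hne]
      exact H1 p e h1 h2 h3
    obtain ⟨K1, K2⟩ := ih (fun e he => hS e (List.mem_cons_of_mem _ he))
      (val.insert (t, e0) (fs m n t e0)) H1'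
    refine ⟨K1, ?_⟩
    intro e h
    apply K2 e
    rcases h with h | h
    · by_cases he0 : e = e0
      · subst he0
        exact Or.inl (PySem.Dict.get?_insert_self _ _ _)
      · refine Or.inl ?_
        rw [PySem.Dict.get?_insert_of_ne _ _ (by
          intro hpe; rw [Prod.mk.injEq] at hpe; exact he0 hpe.2)]
        exact h
    · rcases List.mem_cons.1 h with h | h
      · subst h
        exact Or.inl (PySem.Dict.get?_insert_self _ _ _)
      · exact Or.inr h

lemma backward_aux (m : List Int) (n : Int) (reach : List (List Int))
    (hC : ∀ p', 0 ≤ p' → p' < n → ∀ e ∈ look reach p', 1 ≤ e → e < n - p' →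
      ∀ j, 1 ≤ j → j ≤ e → (e - j + PySem.List.pyGetD m (p' + j) 0) ∈ look reach (p' + j)) :
    ∀ (d : Nat) (t : Int), 0 ≤ t → (n - t).toNat ≤ d →
      ∀ p e, t ≤ p → p < n → e ∈ look reach p →
        (Dt m n reach t).get? (p, e) = some (fs m n p e) := by
  intro d
  induction d with
  | zero => intro t h0 hd p e hp1 hp2 he; exact absurd hp2 (by omega)
  | succ d ih =>
    intro t h0 hd p e hp1 hp2 he
    by_cases htn : t < n
    · rw [Dt_succ m n reach t htn]
      obtain ⟨K1, K2⟩ := bfold_aux m n reach t h0 htn hC (look reach t) (fun e he => he)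
        (Dt m n reach (t + 1))
        (fun p e h1 h2 h3 => ih (t + 1) (by omega) (by omega) p e (by omega) h2 h3)
      by_cases hpt : p = t
      · subst hpt
        exact K2 e (Or.inr he)
      · exact K1 p e (by omega) hp2 he
    · exact absurd hp2 (by omega)


-- ===== VERDICT (by name: the statement is the Claim_ definition above) =====

-- ===== VERDICT (by name: the statement is the Claim_ definition above) =====
theorem zabica_spec : Claim_equal_zabica := by
  unfold Claim_equal_zabica
  intro m _ hpre
  unfold Spec_zabica
  have hn1 : 1 ≤ (m.length : Int) := by
    have := List.length_pos_of_ne_nil (hpre : m ≠ [])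
    omega
  obtain ⟨F1, F2, F3, F4⟩ := forward_aux m (m.length : Int) ((m.length : Int) - 0).toNat 0
    (altUpd (List.replicate m.length ([] : List Int)) 0 (PySem.List.pyGetD m 0 0))
    le_rfl le_rfl (by rw [length_altUpd, List.length_replicate])
  have hreachlen : ((fwd m (m.length : Int) 0
      (altUpd (List.replicate m.length ([] : List Int)) 0 (PySem.List.pyGetD m 0 0))).length
        : Int) = (m.length : Int) := by
    rw [F1, length_altUpd, List.length_replicate]
  have he0r1 : PySem.List.pyGetD m 0 0 ∈
      look (altUpd (List.replicate m.length ([] : List Int)) 0 (PySem.List.pyGetD m 0 0)) 0 := by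
    rw [look_altUpd _ _ _ _ le_rfl (by rw [List.length_replicate]; exact hn1) le_rfl,
      if_pos rfl]
    exact (PySem.Set.mem_add _ _ _).2 (Or.inr rfl)
  have hget := backward_aux m (m.length : Int)
    (fwd m (m.length : Int) 0
      (altUpd (List.replicate m.length ([] : List Int)) 0 (PySem.List.pyGetD m 0 0)))
    (fun p' h1 h2 => F4 p' h1 h2) m.length 0 le_rfl (by omega)
    0 (PySem.List.pyGetD m 0 0) le_rfl (by omega) (F2 0 _ le_rfl he0r1)
  show zabicaSkok m (m.length : Int) 0 (PySem.List.pyGetD m 0 0) =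
    (Dt m (m.length : Int)
      (fwd m (m.length : Int) 0
        (altUpd (List.replicate m.length ([] : List Int)) 0 (PySem.List.pyGetD m 0 0))) 0).getD
      (0, PySem.List.pyGetD m 0 0) 0
  rw [PySem.Dict.getD_eq_get?_getD, hget,
    skok_eq_fs m (m.length : Int) m.length 0 (PySem.List.pyGetD m 0 0) (by omega) le_rfl
      (by omega)]
  rfl
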